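-- pv_equiv track=rewrite | github.com/smerkousdavid/xvla-gtc | open_loop_eval.py | choose_plot_dims
-- ===== SOURCE A (Python) =====
-- def choose_plot_dims(valid_d: int, max_plot_dims: int) -> list[int]:
--     preferred = [0, 1, 2, 3, 4, 5]
--     if valid_d > 6:
--         preferred.append(6)
--     if valid_d > 13:
--         preferred.append(13)
--     for i in range(valid_d):
--         if i not in preferred:
--             preferred.append(i)
--     return preferred[: min(max_plot_dims, valid_d)]
-- ===== SOURCE B (Python) =====
-- def choose_plot_dims(valid_d: int, max_plot_dims: int) -> list[int]:
--     priority = [0, 1, 2, 3, 4, 5, 6, 13]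
--     rank = {d: i for i, d in enumerate(priority)}
--     n = max(6, valid_d)
--     order = sorted(range(n), key=lambda d: rank.get(d, len(priority) + d))
--     return order[: min(max_plot_dims, valid_d)]
-- ===== Notes on version B (the rewrite author's own statement) =====
-- stated objective: faster
-- what changed: Replaced the incremental build (conditional appends plus a membership-tested loop scanning the growing list over range(valid_d)) by a fixed priority-rank table and a single sorted(range(max(6, valid_d)), key=rank) call, sliced the same way.
import Mathlib
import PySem

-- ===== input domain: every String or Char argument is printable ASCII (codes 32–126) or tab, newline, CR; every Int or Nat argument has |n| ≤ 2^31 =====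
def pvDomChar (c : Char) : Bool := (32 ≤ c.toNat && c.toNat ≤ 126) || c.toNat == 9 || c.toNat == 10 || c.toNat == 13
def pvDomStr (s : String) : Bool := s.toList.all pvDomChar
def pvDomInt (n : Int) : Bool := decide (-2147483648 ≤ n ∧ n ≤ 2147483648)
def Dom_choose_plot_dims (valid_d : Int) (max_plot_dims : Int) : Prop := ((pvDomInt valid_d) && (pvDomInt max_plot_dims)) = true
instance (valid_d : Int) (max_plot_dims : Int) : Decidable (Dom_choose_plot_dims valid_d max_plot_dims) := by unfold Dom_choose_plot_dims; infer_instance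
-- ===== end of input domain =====

-- B replaces A's O(n^2) incremental build (conditional appends + a loop whose membership test
-- rescans the growing list) by one sorted(range(max(6, valid_d)), key=rank-table) call, sliced
-- identically; objective: faster (measured).

-- ===== PORT A =====
def choose_plot_dims (valid_d : Int) (max_plot_dims : Int) : List Int :=
  let preferred : List Int := [0, 1, 2, 3, 4, 5]
  let preferred := if valid_d > 6 then preferred ++ [6] else preferred
  let preferred := if valid_d > 13 then preferred ++ [13] else preferred
  let preferred := (PySem.List.pyRange 0 valid_d 1).foldl
      (fun acc i => if i ∈ acc then acc else acc ++ [i]) preferred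
  PySem.List.slice preferred none (some (min max_plot_dims valid_d))

-- ===== PORT B =====
def choose_plot_dims_alt (valid_d : Int) (max_plot_dims : Int) : List Int :=
  let priority : List Int := [0, 1, 2, 3, 4, 5, 6, 13]
  let rank : PySem.Dict Int Int :=
    PySem.Dict.ofList ((PySem.List.enumerate priority 0).map (fun p => (p.2, p.1)))
  let n : Int := max 6 valid_d
  let order := PySem.List.sorted (PySem.List.pyRange 0 n 1)
    (fun d => rank.getD d ((priority.length : Int) + d)) false
  PySem.List.slice order none (some (min max_plot_dims valid_d))

-- ===== PRECONDITION & SPEC =====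
def Spec_choose_plot_dims (valid_d : Int) (max_plot_dims : Int) (out : List Int) : Prop := out = choose_plot_dims_alt valid_d max_plot_dims
instance (valid_d : Int) (max_plot_dims : Int) (out : List Int) : Decidable (Spec_choose_plot_dims valid_d max_plot_dims out) := by unfold Spec_choose_plot_dims; infer_instance

-- ===== CLAIM (what is proved, stated in full; the proofs are below) =====
def Claim_equal_choose_plot_dims : Prop := ∀ (valid_d : Int) (max_plot_dims : Int), Dom_choose_plot_dims valid_d max_plot_dims → Spec_choose_plot_dims valid_d max_plot_dims (choose_plot_dims valid_d max_plot_dims)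

-- ===== LEMMAS AND PROOFS =====

-- the key B sorts by, as a named function (definitionally the lambda in B's port)
def pvKey (d : Int) : Int :=
  (PySem.Dict.ofList ((PySem.List.enumerate ([0, 1, 2, 3, 4, 5, 6, 13] : List Int) 0).map
    (fun p => (p.2, p.1)))).getD d ((([0, 1, 2, 3, 4, 5, 6, 13] : List Int).length : Int) + d)

-- closed form of the rank-table lookup
lemma pvKey_eval (d : Int) :
    pvKey d = if 0 ≤ d ∧ d ≤ 6 then d else if d = 13 then 7 else 8 + d := by
  have hd : (PySem.Dict.ofList ((PySem.List.enumerate ([0, 1, 2, 3, 4, 5, 6, 13] : List Int) 0).map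
      (fun p => (p.2, p.1))))
      = PySem.Dict.mk [(0,0),(1,1),(2,2),(3,3),(4,4),(5,5),(6,6),(13,7)] := by decide
  unfold pvKey
  rw [hd]
  simp only [PySem.Dict.getD, PySem.Dict.get?]
  by_cases h0 : d = 0
  · rw [List.find?_cons_of_pos (by simp [h0])]; simp [h0]
  rw [List.find?_cons_of_neg (by simpa using fun h => h0 h.symm)]
  by_cases h1 : d = 1
  · rw [List.find?_cons_of_pos (by simp [h1])]; simp [h1]
  rw [List.find?_cons_of_neg (by simpa using fun h => h1 h.symm)]
  by_cases h2 : d = 2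
  · rw [List.find?_cons_of_pos (by simp [h2])]; simp [h2]
  rw [List.find?_cons_of_neg (by simpa using fun h => h2 h.symm)]
  by_cases h3 : d = 3
  · rw [List.find?_cons_of_pos (by simp [h3])]; simp [h3]
  rw [List.find?_cons_of_neg (by simpa using fun h => h3 h.symm)]
  by_cases h4 : d = 4
  · rw [List.find?_cons_of_pos (by simp [h4])]; simp [h4]
  rw [List.find?_cons_of_neg (by simpa using fun h => h4 h.symm)]
  by_cases h5 : d = 5
  · rw [List.find?_cons_of_pos (by simp [h5])]; simp [h5]
  rw [List.find?_cons_of_neg (by simpa using fun h => h5 h.symm)]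
  by_cases h6 : d = 6
  · rw [List.find?_cons_of_pos (by simp [h6])]; simp [h6]
  rw [List.find?_cons_of_neg (by simpa using fun h => h6 h.symm)]
  by_cases h13 : d = 13
  · rw [List.find?_cons_of_pos (by simp [h13])]; simp [h13]
  rw [List.find?_cons_of_neg (by simpa using fun h => h13 h.symm)]
  simp
  split_ifs <;> omega

-- A's membership-tested append loop appends exactly the fresh elements, in order
lemma dedup_foldl (l : List Int) (P : List Int) (hl : l.Nodup) :
    l.foldl (fun acc i => if i ∈ acc then acc else acc ++ [i]) P
      = P ++ l.filter (fun i => decide (i ∉ P)) := by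
  induction l generalizing P with
  | nil => simp
  | cons i t ih =>
    rcases List.nodup_cons.mp hl with ⟨hit, ht⟩
    by_cases h : i ∈ P
    · simp only [List.foldl_cons, if_pos h, List.filter_cons]
      simp only [h, not_true_eq_false, decide_false]
      exact ih P ht
    · simp only [List.foldl_cons, if_neg h, List.filter_cons]
      simp only [h, not_false_eq_true, decide_true]
      rw [ih (P ++ [i]) ht]
      rw [List.filter_congr (l := t) (q := fun x => decide (x ∉ P))
        (by intro x hx; have hne : x ≠ i := fun he => hit (he ▸ hx); simp [List.mem_append, hne])]
      simp
lemma full_eq (vd : Int) :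
    ((PySem.List.pyRange 0 vd 1).foldl (fun acc i => if i ∈ acc then acc else acc ++ [i])
        (if vd > 13 then (if vd > 6 then ([0,1,2,3,4,5] : List Int) ++ [6] else [0,1,2,3,4,5]) ++ [13]
         else if vd > 6 then ([0,1,2,3,4,5] : List Int) ++ [6] else [0,1,2,3,4,5]))
      = PySem.List.sorted (PySem.List.pyRange 0 (max 6 vd) 1) pvKey false := by
  rcases lt_or_ge 6 vd with h6 | h6
  · -- vd > 6
    have hmax : max 6 vd = vd := by omega
    rw [hmax]
    have hsplit : PySem.List.pyRange 0 vd 1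
        = PySem.List.pyRange 0 7 1 ++ PySem.List.pyRange 7 vd 1 :=
      PySem.List.pyRange_one_append 0 7 vd (by omega) (by omega)
    have hlow : PySem.List.pyRange 0 7 1 = ([0,1,2,3,4,5,6] : List Int) := by decide
    rcases lt_or_ge 13 vd with h13 | h13
    · -- vd > 13
      rw [if_pos h13, if_pos h6]
      rw [dedup_foldl _ _ (PySem.List.nodup_pyRange_one 0 vd)]
      have hP0 : ([0,1,2,3,4,5] : List Int) ++ [6] ++ [13] = [0,1,2,3,4,5,6,13] := by decide
      rw [hP0, hsplit, List.filter_append, hlow]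
      have hf1 : ([0,1,2,3,4,5,6] : List Int).filter
          (fun i => decide (i ∉ ([0,1,2,3,4,5,6,13] : List Int))) = [] := by decide
      rw [hf1, List.nil_append]
      rw [List.filter_congr (q := fun i => decide (i ≠ 13))
        (by intro x hx
            have := (PySem.List.mem_pyRange_one).mp hx
            simp only [decide_eq_decide, List.mem_cons, List.not_mem_nil]
            constructor
            · intro hn he; exact hn (by simp [he])
            · intro hne hm; rcases hm with h|h|h|h|h|h|h|h|h <;> omega)]
      -- B side
      have hT : ([0,1,2,3,4,5,6,13] : List Int)
            ++ (PySem.List.pyRange 7 vd 1).filter (fun i => decide (i ≠ 13))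
          = ([0,1,2,3,4,5,6] : List Int)
            ++ (13 :: (PySem.List.pyRange 7 vd 1).filter (fun i => decide (i ≠ 13))) := by
        simp
      have h13mem : (13 : Int) ∈ PySem.List.pyRange 7 vd 1 := by
        rw [PySem.List.mem_pyRange_one]; omega
      have hnd7 := PySem.List.nodup_pyRange_one 7 vd
      have hperm : (([0,1,2,3,4,5,6,13] : List Int)
            ++ (PySem.List.pyRange 7 vd 1).filter (fun i => decide (i ≠ 13))).Perm
          (PySem.List.pyRange 0 vd 1) := by
        rw [hT, hsplit, hlow]
        apply List.Perm.append_left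
        have he : (PySem.List.pyRange 7 vd 1).erase 13
            = (PySem.List.pyRange 7 vd 1).filter (fun i => decide (i ≠ 13)) := by
          rw [List.Nodup.erase_eq_filter hnd7]
          apply List.filter_congr; intro x hx; simp [bne, beq_eq_decide]
        rw [← he]
        exact (List.perm_cons_erase h13mem).symm
      have hpw : (([0,1,2,3,4,5,6,13] : List Int)
            ++ (PySem.List.pyRange 7 vd 1).filter (fun i => decide (i ≠ 13))).Pairwise
          (fun a b => pvKey a < pvKey b) := by
        rw [List.pairwise_append]
        refine ⟨by decide, ?_, ?_⟩
        · have := (PySem.List.pairwise_lt_pyRange_one 7 vd).filter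
            (fun i => decide (i ≠ 13))
          refine this.imp_of_mem ?_
          intro a b ha hb hab
          rcases List.mem_filter.mp ha with ⟨ha', hane⟩
          rcases List.mem_filter.mp hb with ⟨hb', hbne⟩
          have ha2 := PySem.List.mem_pyRange_one.mp ha'
          have hb2 := PySem.List.mem_pyRange_one.mp hb'
          simp only [decide_eq_true_eq] at hane hbne
          rw [pvKey_eval, pvKey_eval]
          split_ifs <;> omega
        · intro x hx y hy
          rcases List.mem_filter.mp hy with ⟨hy', hyne⟩
          have hy2 := PySem.List.mem_pyRange_one.mp hy'
          simp only [decide_eq_true_eq] at hyne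
          have hx' : (0 ≤ x ∧ x ≤ 6) ∨ x = 13 := by
            simp only [List.mem_cons, List.not_mem_nil, or_false] at hx
            rcases hx with h|h|h|h|h|h|h|h <;> omega
          rw [pvKey_eval, pvKey_eval]
          split_ifs <;> omega
      rw [← hlow, ← hsplit]
      exact (PySem.List.sorted_eq_of_perm_of_pairwise_lt _ _ pvKey hperm hpw).symm
    · -- 6 < vd ≤ 13
      rw [if_neg (by omega), if_pos h6]
      rw [dedup_foldl _ _ (PySem.List.nodup_pyRange_one 0 vd)]
      have hP0 : ([0,1,2,3,4,5] : List Int) ++ [6] = [0,1,2,3,4,5,6] := by decide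
      rw [hP0, hsplit, List.filter_append, hlow]
      have hf1 : ([0,1,2,3,4,5,6] : List Int).filter
          (fun i => decide (i ∉ ([0,1,2,3,4,5,6] : List Int))) = [] := by decide
      rw [hf1, List.nil_append]
      rw [List.filter_eq_self.mpr (by
        intro x hx
        have := PySem.List.mem_pyRange_one.mp hx
        simp only [decide_eq_true_eq, List.mem_cons, List.not_mem_nil, or_false]
        omega)]
      rw [← hlow, ← hsplit]
      refine (PySem.List.sorted_eq_self_of_pairwise _ pvKey ?_).symm
      refine (PySem.List.pairwise_lt_pyRange_one 0 vd).imp_of_mem ?_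
      intro a b ha hb hab
      have ha2 := PySem.List.mem_pyRange_one.mp ha
      have hb2 := PySem.List.mem_pyRange_one.mp hb
      rw [pvKey_eval, pvKey_eval]
      split_ifs <;> omega
  · -- vd ≤ 6
    have hmax : max 6 vd = 6 := by omega
    rw [hmax, if_neg (by omega), if_neg (by omega)]
    rw [dedup_foldl _ _ (PySem.List.nodup_pyRange_one 0 vd)]
    rw [List.filter_eq_nil_iff.mpr (by
      intro x hx
      have := PySem.List.mem_pyRange_one.mp hx
      simp only [decide_eq_true_eq, List.mem_cons, List.not_mem_nil, or_false, not_not]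
      omega)]
    rw [List.append_nil]
    decide

-- ===== VERDICT (by name: the statement is the Claim_ definition above) =====
theorem choose_plot_dims_spec : Claim_equal_choose_plot_dims := by
  intro vd mpd _
  show _ = _
  unfold choose_plot_dims choose_plot_dims_alt
  simp only []
  rw [full_eq vd]
  rfl
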